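-- pv_equiv track=rewrite | github.com/paulorosadodev/dj4e | Tests/Test 01/nomedoprojeto/nomedoprojeto/views.py | calcular_xp_maximo
-- ===== SOURCE A (Python) =====
-- def calcular_xp_maximo(guess):
--         xp = int(guess)
--         nivel = 1
--         xp_maximo = 100
--         while xp >= xp_maximo:
--             xp -= xp_maximo
--             nivel += 1
--             xp_maximo *= 2
--         return xp_maximo*2
-- ===== SOURCE B (Python) =====
-- def calcular_xp_maximo(guess):
--     xp = int(guess)
--     if xp < 0:
--         return 200
--     n = (xp // 100 + 1).bit_length() - 1
--     return 200 * (2 ** n)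
-- ===== Notes on version B (the rewrite author's own statement) =====
-- stated objective: simpler
-- what changed: Replaces the doubling while-loop with a closed form: the number of iterations is bit_length(xp//100 + 1) - 1, so the answer is 200 * 2**n computed directly.
import Mathlib
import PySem

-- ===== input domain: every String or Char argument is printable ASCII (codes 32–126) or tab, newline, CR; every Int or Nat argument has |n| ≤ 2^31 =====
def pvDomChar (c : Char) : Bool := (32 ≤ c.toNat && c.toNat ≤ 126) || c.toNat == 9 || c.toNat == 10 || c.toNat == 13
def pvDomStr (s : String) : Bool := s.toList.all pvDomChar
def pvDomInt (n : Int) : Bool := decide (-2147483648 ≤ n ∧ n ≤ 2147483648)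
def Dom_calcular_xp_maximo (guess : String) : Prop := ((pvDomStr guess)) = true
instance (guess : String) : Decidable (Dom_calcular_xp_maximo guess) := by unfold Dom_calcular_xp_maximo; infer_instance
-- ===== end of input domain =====

-- B replaces A's doubling while-loop by a closed form (the loop runs bitLength(xp//100+1)-1 times); same value everywhere int(guess) parses.


-- ===== PORT A =====
-- the while-loop of A: while xp >= xp_maximo: xp -= xp_maximo; xp_maximo *= 2
-- (the '0 < m' conjunct only makes the recursion total; from the start value m = 100 it always holds)
def pvLoopA (xp m : Int) : Int :=
  if h : m ≤ xp ∧ 0 < m then pvLoopA (xp - m) (m * 2) else m * 2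
termination_by xp.toNat
decreasing_by omega

def calcular_xp_maximo (guess : String) : Int :=
  match PySem.Int.ofStr? guess with
  | none => 0          -- int(guess) raises ValueError: excluded by Pre_
  | some xp => pvLoopA xp 100

-- ===== PORT B =====
def calcular_xp_maximo_alt (guess : String) : Int :=
  match PySem.Int.ofStr? guess with
  | none => 0          -- int(guess) raises ValueError: excluded by Pre_
  | some xp =>
    if xp < 0 then 200
    else
      let n := PySem.Int.bitLength (PySem.Int.floordiv xp 100 + 1) - 1
      200 * 2 ^ n

-- ===== PRECONDITION & SPEC =====
-- Pre_ excludes exactly the strings on which int(guess) raises ValueError (both A and B raise there).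
def Pre_calcular_xp_maximo (guess : String) : Prop := (PySem.Int.ofStr? guess).isSome
instance (guess : String) : Decidable (Pre_calcular_xp_maximo guess) := by
  unfold Pre_calcular_xp_maximo; infer_instance

def pvWitness_calcular_xp_maximo : String := "250"

def Spec_calcular_xp_maximo (guess : String) (out : Int) : Prop := out = calcular_xp_maximo_alt guess
instance (guess : String) (out : Int) : Decidable (Spec_calcular_xp_maximo guess out) := by
  unfold Spec_calcular_xp_maximo; infer_instance

-- ===== CLAIM (what is proved, stated in full; the proofs are below) =====
def Claim_equal_calcular_xp_maximo : Prop := ∀ (guess : String), Dom_calcular_xp_maximo guess → Pre_calcular_xp_maximo guess → Spec_calcular_xp_maximo guess (calcular_xp_maximo guess)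

-- ===== LEMMAS AND PROOFS =====

-- iteration count of the loop: bitLength (xp//m + 1) - 1, for 0 ≤ xp and 0 < m
theorem pvLoopA_closed (k : Nat) (xp m : Int) (hk : xp.toNat ≤ k) (hm : 0 < m) (hxp : 0 ≤ xp) :
    pvLoopA xp m = 2 * m * 2 ^ (PySem.Int.bitLength (PySem.Int.floordiv xp m + 1) - 1) := by
  induction k generalizing xp m with
  | zero =>
    have hxp0 : xp = 0 := by omega
    subst hxp0
    rw [pvLoopA]
    have h0 : PySem.Int.floordiv 0 m = 0 := by
      rw [PySem.Int.floordiv_eq_ediv_of_pos hm]; simp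
    rw [h0]
    have hb : PySem.Int.bitLength (0 + 1) = 1 := by decide
    rw [hb]
    have : ¬ (m ≤ (0:Int) ∧ 0 < m) := by omega
    simp [this]; ring
  | succ k ih =>
    rw [pvLoopA]
    by_cases hcond : m ≤ xp ∧ 0 < m
    · rw [dif_pos hcond]
      have hxm : 0 ≤ xp - m := by omega
      have hm2 : 0 < m * 2 := by omega
      have hrec := ih (xp - m) (m * 2) (by omega) hm2 hxm
      rw [hrec]
      -- let a = xp / m (floor); bounds
      set a : Int := PySem.Int.floordiv xp m with ha
      have habounds : a * m ≤ xp ∧ xp < (a + 1) * m := by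
        have := (PySem.Int.floordiv_eq_iff_of_pos hm (a := xp) (q := a)).mp ha.symm
        exact this
      have ha1 : 1 ≤ a := by nlinarith [habounds.1, habounds.2]
      -- floordiv (xp - m) (m*2) = (a - 1) / 2  (Int.ediv)
      set b : Int := (a - 1) / 2 with hb
      have hb1 : 2 * b ≤ a - 1 ∧ a - 1 ≤ 2 * b + 1 := by omega
      have hfd : PySem.Int.floordiv (xp - m) (m * 2) = b := by
        rw [PySem.Int.floordiv_eq_iff_of_pos hm2]
        constructor
        · nlinarith [habounds.1]
        · nlinarith [habounds.2]
      rw [hfd]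
      -- bitLength (a+1) = bitLength ((a+1)/2) + 1 and (a+1)/2 = b+1
      have hq : PySem.Int.floordiv (a + 1) 2 = b + 1 := by
        rw [PySem.Int.floordiv_eq_ediv_of_pos (by omega)]; omega
      have hbl : PySem.Int.bitLength (a + 1) = PySem.Int.bitLength (b + 1) + 1 := by
        rw [PySem.Int.bitLength_of_pos (by omega), hq]
      rw [hbl]
      -- bitLength (b+1) ≥ 1 since b+1 > 0
      have hblpos : 1 ≤ PySem.Int.bitLength (b + 1) := by
        rw [PySem.Int.bitLength_of_pos (by omega)]; omega
      have he : PySem.Int.bitLength (b + 1) + 1 - 1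
          = (PySem.Int.bitLength (b + 1) - 1) + 1 := by omega
      rw [he, pow_succ]; ring
    · rw [dif_neg hcond]
      have hxlt : xp < m := by omega
      have h0 : PySem.Int.floordiv xp m = 0 := by
        rw [PySem.Int.floordiv_eq_iff_of_pos hm]; constructor <;> omega
      rw [h0]
      have hb : PySem.Int.bitLength (0 + 1) = 1 := by decide
      rw [hb]; ring

theorem pvLoopA_neg (xp m : Int) (hm : 0 < m) (hxp : xp < 0) : pvLoopA xp m = m * 2 := by
  rw [pvLoopA]
  have : ¬ (m ≤ xp ∧ 0 < m) := by omega
  simp [this]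

-- ===== VERDICT (by name: the statement is the Claim_ definition above) =====
theorem calcular_xp_maximo_spec : Claim_equal_calcular_xp_maximo := by
  intro guess _ hpre
  unfold Spec_calcular_xp_maximo calcular_xp_maximo calcular_xp_maximo_alt
  cases hof : PySem.Int.ofStr? guess with
  | none => rfl
  | some xp =>
    simp only []
    by_cases hneg : xp < 0
    · rw [if_pos hneg, pvLoopA_neg xp 100 (by norm_num) hneg]; norm_num
    · rw [if_neg hneg]
      have := pvLoopA_closed xp.toNat xp 100 (le_refl _) (by norm_num) (by omega)
      rw [this]; norm_num
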